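-- pv_equiv track=rewrite | github.com/lily750918/ae | utils/orders.py | pick_tp_sl_algo_candidates
-- ===== SOURCE A (Python) =====
-- from typing import List, Optional, Tuple
--
-- FUTURES_ALGO_TP_TYPES = frozenset(
--     {
--         "TAKE_PROFIT_MARKET",
--         "TAKE_PROFIT",
--         "TAKE_PROFIT_LIMIT",
--     }
-- )
--
-- FUTURES_ALGO_SL_TYPES = frozenset(
--     {
--         "STOP_MARKET",
--         "STOP",
--         "STOP_LIMIT",
--     }
-- )
--
-- def pick_tp_sl_algo_candidates(
--     algo_orders: List[dict],
--     close_side: str,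
--     preferred_tp_id: Optional[str] = None,
--     preferred_sl_id: Optional[str] = None,
-- ) -> Tuple[Optional[dict], Optional[dict]]:
--     """在开放算法单中选与本仓平仓方向一致的止盈、止损单（各一张；多单位时优先匹配本地记录的 algoId）。"""
--     tps = [
--         o
--         for o in algo_orders
--         if o.get("orderType") in FUTURES_ALGO_TP_TYPES and o.get("side") == close_side
--     ]
--     sls = [
--         o
--         for o in algo_orders
--         if o.get("orderType") in FUTURES_ALGO_SL_TYPES and o.get("side") == close_side
--     ]
--
--     def _pick(cands: List[dict], pref: Optional[str]) -> Optional[dict]: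
--         if not cands:
--             return None
--         if pref:
--             ps = str(pref).strip()
--             for o in cands:
--                 oid = str(o.get("algoId") or o.get("orderId") or "")
--                 if oid == ps:
--                     return o
--         return cands[0]
--
--     return _pick(tps, preferred_tp_id), _pick(sls, preferred_sl_id)
-- ===== SOURCE B (Python) =====
-- from typing import List, Optional, Tuple
--
-- FUTURES_ALGO_TP_TYPES = frozenset(
--     {"TAKE_PROFIT_MARKET", "TAKE_PROFIT", "TAKE_PROFIT_LIMIT"}
-- )
-- FUTURES_ALGO_SL_TYPES = frozenset({"STOP_MARKET", "STOP", "STOP_LIMIT"})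
--
--
-- def pick_tp_sl_algo_candidates(
--     algo_orders: List[dict],
--     close_side: str,
--     preferred_tp_id: Optional[str] = None,
--     preferred_sl_id: Optional[str] = None,
-- ) -> Tuple[Optional[dict], Optional[dict]]:
--     """Single pass: classify each order and latch first/preferred TP and SL slots."""
--     tp_ps = str(preferred_tp_id).strip() if preferred_tp_id else None
--     sl_ps = str(preferred_sl_id).strip() if preferred_sl_id else None
--     first_tp = first_sl = pref_tp = pref_sl = None
--     for o in algo_orders:
--         if o.get("side") != close_side:
--             continue
--         t = o.get("orderType")
--         if t in FUTURES_ALGO_TP_TYPES: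
--             if first_tp is None:
--                 first_tp = o
--             if tp_ps is not None and pref_tp is None:
--                 if str(o.get("algoId") or o.get("orderId") or "") == tp_ps:
--                     pref_tp = o
--         elif t in FUTURES_ALGO_SL_TYPES:
--             if first_sl is None:
--                 first_sl = o
--             if sl_ps is not None and pref_sl is None:
--                 if str(o.get("algoId") or o.get("orderId") or "") == sl_ps:
--                     pref_sl = o
--     return (
--         pref_tp if pref_tp is not None else first_tp,
--         pref_sl if pref_sl is not None else first_sl,
--     )
-- ===== Notes on version B (the rewrite author's own statement) =====
-- stated objective: alternative
-- what changed: Replaced the two filtering list comprehensions plus a separate first/preferred pick helper by a single pass over algo_orders that classifies each order and latches four slots (first TP, first SL, preferred TP, preferred SL), combining them at the end.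
import Mathlib
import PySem

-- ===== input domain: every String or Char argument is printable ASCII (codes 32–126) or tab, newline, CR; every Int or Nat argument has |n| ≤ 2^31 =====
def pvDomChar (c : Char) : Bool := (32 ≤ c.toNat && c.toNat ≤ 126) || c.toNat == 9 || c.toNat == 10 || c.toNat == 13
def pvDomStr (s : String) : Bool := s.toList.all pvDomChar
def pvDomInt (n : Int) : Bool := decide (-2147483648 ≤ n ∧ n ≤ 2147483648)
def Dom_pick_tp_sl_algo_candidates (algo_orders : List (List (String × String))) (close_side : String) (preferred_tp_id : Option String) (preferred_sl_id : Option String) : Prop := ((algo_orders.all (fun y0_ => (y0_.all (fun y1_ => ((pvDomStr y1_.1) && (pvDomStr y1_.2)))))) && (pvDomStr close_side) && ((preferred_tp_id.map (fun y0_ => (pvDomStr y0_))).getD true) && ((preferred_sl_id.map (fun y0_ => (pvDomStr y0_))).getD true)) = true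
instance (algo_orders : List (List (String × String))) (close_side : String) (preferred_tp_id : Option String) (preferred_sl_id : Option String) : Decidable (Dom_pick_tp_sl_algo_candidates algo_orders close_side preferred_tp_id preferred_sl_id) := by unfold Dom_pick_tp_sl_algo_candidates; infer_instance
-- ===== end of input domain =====

-- B replaces A's two filtering comprehensions + pick helper by one pass that latches
-- four first-match slots (objective: alternative decomposition, same value everywhere).

-- ===== PORT A =====
-- shared helpers (used verbatim by both ports)
def pvTPTypes : List String := ["TAKE_PROFIT_MARKET", "TAKE_PROFIT", "TAKE_PROFIT_LIMIT"]
def pvSLTypes : List String := ["STOP_MARKET", "STOP", "STOP_LIMIT"]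

-- o.get(k) on a dict (assoc list, first match)
def pvGet (o : List (String × String)) (k : String) : Option String := o.lookup k

-- o.get("orderType") in <types> and o.get("side") == close_side
def pvIsCand (types : List String) (o : List (String × String)) (close_side : String) : Bool :=
  (match pvGet o "orderType" with
   | some t => types.contains t
   | none => false) && (pvGet o "side" == some close_side)

-- str(o.get("algoId") or o.get("orderId") or "")
def pvOid (o : List (String × String)) : String :=
  let a := (pvGet o "algoId").getD ""
  if a = "" then (pvGet o "orderId").getD "" else a

-- the `for o in cands: if oid == ps: return o` loop of _pick
def pvFindLoop (cands : List (List (String × String))) (ps : String) : Option (List (String × String)) :=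
  match cands with
  | [] => none
  | o :: rest => if pvOid o == ps then some o else pvFindLoop rest ps

-- _pick(cands, pref)
def pvPick (cands : List (List (String × String))) (pref : Option String) : Option (List (String × String)) :=
  match cands with
  | [] => none
  | c :: _ =>
    if (match pref with | some s => s != "" | none => false) then
      let ps := PySem.Str.strip (pref.getD "")
      match pvFindLoop cands ps with
      | some o => some o
      | none => some c
    else some c

def pick_tp_sl_algo_candidates (algo_orders : List (List (String × String))) (close_side : String) (preferred_tp_id : Option String) (preferred_sl_id : Option String) : (Option (List (String × String))) × (Option (List (String × String))) :=
  let tps := algo_orders.filter (fun o => pvIsCand pvTPTypes o close_side)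
  let sls := algo_orders.filter (fun o => pvIsCand pvSLTypes o close_side)
  (pvPick tps preferred_tp_id, pvPick sls preferred_sl_id)

-- ===== PORT B =====
-- tp_ps = str(pref).strip() if pref else None
def pvNormPref (pref : Option String) : Option String :=
  match pref with
  | some s => if s != "" then some (PySem.Str.strip s) else none
  | none => none

-- one loop iteration over the four slots (first_tp, first_sl, pref_tp, pref_sl)
def pvStep (close_side : String) (tp_ps sl_ps : Option String)
    (st : Option (List (String × String)) × Option (List (String × String)) × Option (List (String × String)) × Option (List (String × String)))
    (o : List (String × String)) :
    Option (List (String × String)) × Option (List (String × String)) × Option (List (String × String)) × Option (List (String × String)) :=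
  if pvGet o "side" != some close_side then st
  else
    let t := pvGet o "orderType"
    if (match t with | some t' => pvTPTypes.contains t' | none => false) then
      (if st.1.isNone then some o else st.1, st.2.1,
       if (match tp_ps with | some ps => st.2.2.1.isNone && (pvOid o == ps) | none => false) then some o else st.2.2.1,
       st.2.2.2)
    else if (match t with | some t' => pvSLTypes.contains t' | none => false) then
      (st.1, if st.2.1.isNone then some o else st.2.1, st.2.2.1,
       if (match sl_ps with | some ps => st.2.2.2.isNone && (pvOid o == ps) | none => false) then some o else st.2.2.2)
    else st

def pick_tp_sl_algo_candidates_alt (algo_orders : List (List (String × String))) (close_side : String) (preferred_tp_id : Option String) (preferred_sl_id : Option String) : (Option (List (String × String))) × (Option (List (String × String))) :=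
  let tp_ps := pvNormPref preferred_tp_id
  let sl_ps := pvNormPref preferred_sl_id
  let st := algo_orders.foldl (pvStep close_side tp_ps sl_ps) (none, none, none, none)
  (match st.2.2.1 with | some o => some o | none => st.1,
   match st.2.2.2 with | some o => some o | none => st.2.1)

-- ===== PRECONDITION & SPEC =====
def Spec_pick_tp_sl_algo_candidates (algo_orders : List (List (String × String))) (close_side : String) (preferred_tp_id : Option String) (preferred_sl_id : Option String) (out : (Option (List (String × String))) × (Option (List (String × String)))) : Prop := out = pick_tp_sl_algo_candidates_alt algo_orders close_side preferred_tp_id preferred_sl_id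
instance (algo_orders : List (List (String × String))) (close_side : String) (preferred_tp_id : Option String) (preferred_sl_id : Option String) (out : (Option (List (String × String))) × (Option (List (String × String)))) : Decidable (Spec_pick_tp_sl_algo_candidates algo_orders close_side preferred_tp_id preferred_sl_id out) := by unfold Spec_pick_tp_sl_algo_candidates; infer_instance

-- ===== CLAIM (what is proved, stated in full; the proofs are below) =====
def Claim_equal_pick_tp_sl_algo_candidates : Prop := ∀ (algo_orders : List (List (String × String))) (close_side : String) (preferred_tp_id : Option String) (preferred_sl_id : Option String), Dom_pick_tp_sl_algo_candidates algo_orders close_side preferred_tp_id preferred_sl_id → Spec_pick_tp_sl_algo_candidates algo_orders close_side preferred_tp_id preferred_sl_id (pick_tp_sl_algo_candidates algo_orders close_side preferred_tp_id preferred_sl_id)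

-- ===== LEMMAS AND PROOFS =====

-- find the first match of the normalized preferred id among candidates (none if no pref)
def pvPFind (ps? : Option String) (cands : List (List (String × String))) : Option (List (String × String)) :=
  match ps? with
  | some ps => pvFindLoop cands ps
  | none => none

-- B's fold, characterized componentwise over the filtered candidate lists
theorem pvFold_char (close_side : String) (tp_ps sl_ps : Option String) :
    ∀ (l : List (List (String × String))) ftp fsl ptp psl,
      l.foldl (pvStep close_side tp_ps sl_ps) (ftp, fsl, ptp, psl) =
        ((if ftp.isNone then (l.filter (fun o => pvIsCand pvTPTypes o close_side)).head? else ftp),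
         (if fsl.isNone then (l.filter (fun o => pvIsCand pvSLTypes o close_side)).head? else fsl),
         (if ptp.isNone then pvPFind tp_ps (l.filter (fun o => pvIsCand pvTPTypes o close_side)) else ptp),
         (if psl.isNone then pvPFind sl_ps (l.filter (fun o => pvIsCand pvSLTypes o close_side)) else psl)) := by
  intro l
  induction l with
  | nil =>
    intro ftp fsl ptp psl
    cases ftp <;> cases fsl <;> cases ptp <;> cases psl <;> cases tp_ps <;> cases sl_ps <;>
      simp [pvPFind, pvFindLoop]
  | cons o rest ih =>
    intro ftp fsl ptp psl
    simp only [List.foldl_cons, List.filter_cons]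
    cases hside : (pvGet o "side" == some close_side) with
    | false =>
      have hc1 : pvIsCand pvTPTypes o close_side = false := by simp [pvIsCand, hside]
      have hc2 : pvIsCand pvSLTypes o close_side = false := by simp [pvIsCand, hside]
      have hstep : pvStep close_side tp_ps sl_ps (ftp, fsl, ptp, psl) o = (ftp, fsl, ptp, psl) := by
        simp [pvStep, bne, hside]
      rw [hstep, ih]
      simp [hc1, hc2]
    | true =>
      cases ht : pvGet o "orderType" with
      | none =>
        have hc1 : pvIsCand pvTPTypes o close_side = false := by simp [pvIsCand, ht]
        have hc2 : pvIsCand pvSLTypes o close_side = false := by simp [pvIsCand, ht]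
        have hstep : pvStep close_side tp_ps sl_ps (ftp, fsl, ptp, psl) o = (ftp, fsl, ptp, psl) := by
          simp [pvStep, bne, hside, ht]
        rw [hstep, ih]
        simp [hc1, hc2]
      | some t =>
        by_cases htp : t ∈ pvTPTypes
        · have hnsl : t ∉ pvSLTypes := by
            intro h2; simp [pvTPTypes] at htp; rcases htp with rfl|rfl|rfl <;> simp [pvSLTypes] at h2
          have hc1 : pvIsCand pvTPTypes o close_side = true := by simp [pvIsCand, ht, htp, hside]
          have hc2 : pvIsCand pvSLTypes o close_side = false := by simp [pvIsCand, ht, hnsl]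
          have hstep : pvStep close_side tp_ps sl_ps (ftp, fsl, ptp, psl) o =
              (if ftp.isNone then some o else ftp, fsl,
               if (match tp_ps with | some ps => ptp.isNone && (pvOid o == ps) | none => false) then some o else ptp,
               psl) := by
            simp [pvStep, bne, hside, ht, htp]
          rw [hstep, ih]
          simp only [hc1, hc2, if_true, if_false, Bool.false_eq_true]
          cases ftp <;> cases ptp <;> cases tp_ps <;>
            simp [pvPFind, pvFindLoop] <;> split <;> simp
        · have hc1 : pvIsCand pvTPTypes o close_side = false := by simp [pvIsCand, ht, htp]
          by_cases hsl : t ∈ pvSLTypes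
          · have hc2 : pvIsCand pvSLTypes o close_side = true := by simp [pvIsCand, ht, hsl, hside]
            have hstep : pvStep close_side tp_ps sl_ps (ftp, fsl, ptp, psl) o =
                (ftp, if fsl.isNone then some o else fsl, ptp,
                 if (match sl_ps with | some ps => psl.isNone && (pvOid o == ps) | none => false) then some o else psl) := by
              simp [pvStep, bne, hside, ht, htp, hsl]
            rw [hstep, ih]
            simp only [hc1, hc2, if_true, if_false, Bool.false_eq_true]
            cases fsl <;> cases psl <;> cases sl_ps <;>
              simp [pvPFind, pvFindLoop] <;> split <;> simp
          · have hc2 : pvIsCand pvSLTypes o close_side = false := by simp [pvIsCand, ht, hsl]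
            have hstep : pvStep close_side tp_ps sl_ps (ftp, fsl, ptp, psl) o = (ftp, fsl, ptp, psl) := by
              simp [pvStep, bne, hside, ht, htp, hsl]
            rw [hstep, ih]
            simp [hc1, hc2]

-- A's _pick equals "preferred match, else first", per candidate list
theorem pvPick_char (cands : List (List (String × String))) (pref : Option String) :
    pvPick cands pref =
      (match pvPFind (pvNormPref pref) cands with
       | some o => some o
       | none => cands.head?) := by
  cases cands with
  | nil =>
    cases pref with
    | none => simp [pvPick, pvNormPref, pvPFind]
    | some s => by_cases h : s = "" <;> simp [pvPick, pvNormPref, pvPFind, pvFindLoop, h]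
  | cons c rest =>
    cases pref with
    | none => simp [pvPick, pvNormPref, pvPFind]
    | some s =>
      by_cases h : s = ""
      · simp [pvPick, pvNormPref, pvPFind, h]
      · simp only [pvPick, pvNormPref, pvPFind]
        simp only [bne, Bool.not_eq_true']
        cases hf : pvFindLoop (c :: rest) (PySem.Str.strip s) <;> simp [h, hf]

-- ===== VERDICT (by name: the statement is the Claim_ definition above) =====
theorem pick_tp_sl_algo_candidates_spec : Claim_equal_pick_tp_sl_algo_candidates := by
  intro algo_orders close_side ptp psl _
  show _ = pick_tp_sl_algo_candidates_alt _ _ _ _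
  simp only [pick_tp_sl_algo_candidates, pick_tp_sl_algo_candidates_alt, pvFold_char,
    Option.isNone_none, if_true, pvPick_char]
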